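-- pv_equiv track=rewrite | github.com/yujunhan111/HCL_public | HCL_Public/model/fusion/HCL.py | _build_structure_tables
-- ===== SOURCE A (Python) =====
-- from itertools import combinations
--
-- def _build_structure_tables(M: int):
--     """
--     Build lookup tables for M modalities.
--
--     Returns
--     -------
--     structure_list : list of frozenset
--         All 2^M - 1 non-empty subsets, ordered by descending size then
--         ascending lex order.
--     structure_mask : dict[int, dict[int, int]]
--         structure_mask[m][k] = s means modality m participates in structure k
--         at encoder level s.  Level s = M - subset_size.
--         Key k is absent when modality m does not belong to structure k.
--     """
--     subsets = []
--     for size in range(M, 0, -1):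
--         for combo in combinations(range(M), size):
--             subsets.append(frozenset(combo))
--
--     mask = {m: {} for m in range(M)}
--     for k, subset in enumerate(subsets):
--         level = M - len(subset)
--         for m in subset:
--             mask[m][k] = level
--
--     return subsets, mask
-- ===== SOURCE B (Python) =====
-- def _build_structure_tables(M: int):
--     """Enumerate non-empty subsets as bitmasks 1..2^M-1, sort by (descending
--     size, ascending lex member tuple); build the mask by per-modality scans."""
--     n = max(M, 0)
--     raw = [[i for i in range(n) if b >> i & 1] for b in range(1, 1 << n)]
--     raw.sort(key=lambda t: [n - len(t)] + t)
--     subsets = [frozenset(t) for t in raw]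
--     mask = {m: {k: M - len(t) for k, t in enumerate(raw) if m in t}
--             for m in range(M)}
--     return subsets, mask
-- ===== Notes on version B (the rewrite author's own statement) =====
-- stated objective: alternative
-- what changed: Replaces the per-size itertools.combinations generation and the dict-of-dicts mutation loop by enumerating all non-empty subsets as bitmask integers, sorting them once by (descending size, ascending lex members), and building each modality's mask row by an independent scan.
import Mathlib
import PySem

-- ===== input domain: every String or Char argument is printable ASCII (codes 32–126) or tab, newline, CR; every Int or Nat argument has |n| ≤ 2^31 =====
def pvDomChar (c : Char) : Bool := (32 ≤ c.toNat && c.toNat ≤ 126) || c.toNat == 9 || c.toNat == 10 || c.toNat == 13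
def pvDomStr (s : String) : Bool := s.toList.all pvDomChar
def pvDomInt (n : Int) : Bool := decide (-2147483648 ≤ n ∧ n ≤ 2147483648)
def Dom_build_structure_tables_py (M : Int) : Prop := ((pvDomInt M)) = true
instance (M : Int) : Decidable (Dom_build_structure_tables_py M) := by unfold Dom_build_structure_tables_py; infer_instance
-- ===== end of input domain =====

-- B replaces the per-size combinations generation and the dict-of-dicts mutation loop by a
-- bitmask enumeration of all non-empty subsets, one sort, and independent per-modality scans
-- (alternative decomposition, not claimed faster).

-- ===== PORT A =====
-- itertools.combinations(xs, k), exact: all length-k selections of xs in order, lexicographic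
-- by selected positions (first all selections containing the head, then those without it).
def pyCombinations : List Int → Nat → List (List Int)
  | _, 0 => [[]]
  | [], _+1 => []
  | x :: xs, k+1 => (pyCombinations xs k).map (fun c => x :: c) ++ pyCombinations xs (k+1)

-- frozenset(combo) is PySem.Set.ofList combo; 'for m in subset' iterates a frozenset whose
-- hash order is not modelled, but the loop body only writes mask[m][k] for DISTINCT existing
-- outer keys m, so the resulting dict does not depend on that order; iterating the Set's
-- element list is therefore exact.
def build_structure_tables_py (M : Int) : List (List Int) × (List (Int × List (Int × Int))) :=
  let subsets : List (List Int) :=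
    (PySem.List.pyRange M 0 (-1)).foldl
      (fun acc size =>
        (pyCombinations (PySem.List.pyRange 0 M 1) size.toNat).foldl
          (fun acc combo => acc ++ [PySem.Set.ofList combo]) acc) []
  let mask0 : PySem.Dict Int (PySem.Dict Int Int) :=
    (PySem.List.pyRange 0 M 1).foldl (fun d m => d.insert m PySem.Dict.empty) PySem.Dict.empty
  let mask :=
    (PySem.List.enumerate subsets 0).foldl
      (fun d p =>
        p.2.foldl (fun d m => d.modify m PySem.Dict.empty
          (fun inner => inner.insert p.1 (M - (p.2.length : Int)))) d)
      mask0
  (subsets, mask.items.map (fun q => (q.1, q.2.items)))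

-- ===== PORT B =====
-- b >> i & 1 ported via Nat shift/and on b.toNat (b ≥ 1 from range(1, 1<<n), i ≥ 0: exact);
-- Python's list-key comparison is lexicographic = the Lex order of Mathlib's
-- LinearOrder (List Int), whose instances are written out so the sort's order is that one;
-- the dict comprehensions run over strictly increasing fresh keys, so each dict is literally
-- its association list.
def build_structure_tables_py_alt (M : Int) : List (List Int) × (List (Int × List (Int × Int))) :=
  let n : Int := max M 0
  let raw : List (List Int) :=
    (PySem.List.pyRange 1 ((2 ^ n.toNat : Nat) : Int) 1).map
      (fun b => (PySem.List.pyRange 0 n 1).filter (fun i => (b.toNat >>> i.toNat) &&& 1 == 1))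
  let rawS := @PySem.List.sorted (List Int) (List Int) List.instLinearOrder.toLT
      List.instLinearOrder.toDecidableLT raw (fun t => (n - (t.length : Int)) :: t) false
  let subsets := rawS.map PySem.Set.ofList
  let mask : List (Int × List (Int × Int)) :=
    (PySem.List.pyRange 0 M 1).map
      (fun m => (m, ((PySem.List.enumerate rawS 0).filter (fun p => p.2.contains m)).map
          (fun p => (p.1, M - (p.2.length : Int)))))
  (subsets, mask)

-- ===== PRECONDITION & SPEC =====
def Spec_build_structure_tables_py (M : Int) (out : List (List Int) × (List (Int × List (Int × Int)))) : Prop := out = build_structure_tables_py_alt M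
instance (M : Int) (out : List (List Int) × (List (Int × List (Int × Int)))) : Decidable (Spec_build_structure_tables_py M out) := by unfold Spec_build_structure_tables_py; infer_instance

-- ===== CLAIM (what is proved, stated in full; the proofs are below) =====
def Claim_equal_build_structure_tables_py : Prop := ∀ (M : Int), Dom_build_structure_tables_py M → Spec_build_structure_tables_py M (build_structure_tables_py M)

-- ===== LEMMAS AND PROOFS =====

-- the strict lex order on List Int used by B's sort
def pvLt (a b : List Int) : Prop := @LT.lt (List Int) List.instLinearOrder.toLT a b

def pvKey (M : Int) (t : List Int) : List Int := (M - (t.length : Int)) :: t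

-- A's subset enumeration, flattened
def pvAcore (M : Int) : List (List Int) :=
  (PySem.List.pyRange M 0 (-1)).flatMap (fun s => pyCombinations (PySem.List.pyRange 0 M 1) s.toNat)

-- B's raw bitmask enumeration
def pvRaw (M : Int) : List (List Int) :=
  (PySem.List.pyRange 1 ((2 ^ (max M 0).toNat : Nat) : Int) 1).map
    (fun b => (PySem.List.pyRange 0 (max M 0) 1).filter (fun i => (b.toNat >>> i.toNat) &&& 1 == 1))

def orMask (l : List Int) : Nat := l.foldr (fun i acc => 2 ^ i.toNat ||| acc) 0

lemma mem_pyCombinations (xs : List Int) : ∀ (k : Nat) (l : List Int),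
    l ∈ pyCombinations xs k ↔ l.Sublist xs ∧ l.length = k := by
  induction xs with
  | nil =>
    intro k l
    cases k with
    | zero => simp [pyCombinations, List.sublist_nil, List.length_eq_zero_iff]
    | succ k =>
      simp only [pyCombinations, List.mem_nil_iff, false_iff, not_and]
      intro h hlen
      simp [List.sublist_nil] at h
      simp [h] at hlen
  | cons x xs ih =>
    intro k l
    cases k with
    | zero =>
      simp [pyCombinations, List.length_eq_zero_iff]
      rintro rfl; simp
    | succ k =>
      simp only [pyCombinations, List.mem_append, List.mem_map, ih]
      constructor
      · rintro (⟨c, ⟨hs, hlen⟩, rfl⟩ | ⟨hs, hlen⟩)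
        · exact ⟨List.cons_sublist_cons.mpr hs, by simp [hlen]⟩
        · exact ⟨hs.trans (List.sublist_cons_self x xs), hlen⟩
      · rintro ⟨hs, hlen⟩
        rcases List.sublist_cons_iff.mp hs with h | ⟨r, rfl, hr⟩
        · exact Or.inr ⟨h, hlen⟩
        · exact Or.inl ⟨r, ⟨hr, by simpa using hlen⟩, rfl⟩

lemma pvLt_rel {x y : Int} (a b : List Int) (h : x < y) : pvLt (x :: a) (y :: b) :=
  List.Lex.rel h

lemma pvLt_cons {x : Int} {a b : List Int} (h : pvLt a b) : pvLt (x :: a) (x :: b) :=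
  List.Lex.cons h

lemma pairwise_pyCombinations (xs : List Int) (hp : xs.Pairwise (· < ·)) :
    ∀ k : Nat, (pyCombinations xs k).Pairwise pvLt := by
  induction xs with
  | nil => intro k; cases k <;> simp [pyCombinations]
  | cons x xs ih =>
    intro k
    cases k with
    | zero => simp [pyCombinations]
    | succ k =>
      rw [List.pairwise_cons] at hp
      rw [pyCombinations, List.pairwise_append]
      refine ⟨?_, ih hp.2 (k+1), ?_⟩
      · rw [List.pairwise_map]
        exact (ih hp.2 k).imp (fun h => pvLt_cons h)
      · rintro a ha b hb
        rcases List.mem_map.mp ha with ⟨c, hc, rfl⟩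
        rcases (mem_pyCombinations xs (k+1) b).mp hb with ⟨hsb, hlb⟩
        cases b with
        | nil => simp at hlb
        | cons y b' =>
          have hy : y ∈ xs := hsb.subset (by simp)
          exact pvLt_rel _ _ (hp.1 y hy)

lemma filter_mem_of_sublist (R l : List Int) (hn : R.Nodup) (h : l.Sublist R) :
    R.filter (fun i => l.contains i) = l := by
  induction h with
  | slnil => rfl
  | @cons l' R' a hsub ih =>
    rw [List.nodup_cons] at hn
    have ha : a ∉ l' := fun hm => hn.1 (hsub.subset hm)
    simp only [List.filter_cons]
    rw [if_neg (by simpa using ha)]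
    exact ih hn.2
  | @cons₂ l' R' a hsub ih =>
    rw [List.nodup_cons] at hn
    simp only [List.filter_cons]
    rw [if_pos (by simp)]
    have : R'.filter (fun i => (a :: l').contains i) = R'.filter (fun i => l'.contains i) := by
      apply List.filter_congr
      intro i hi
      have : i ≠ a := fun he => hn.1 (he ▸ hi)
      simp [this]
    rw [this, ih hn.2]

lemma testBit_orMask (l : List Int) (hnn : ∀ i ∈ l, 0 ≤ i) (j : Nat) :
    (orMask l).testBit j = decide ((j : Int) ∈ l) := by
  induction l with
  | nil => simp [orMask]
  | cons i l ih =>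
    have h0 : 0 ≤ i := hnn i (by simp)
    have ihl := ih (fun x hx => hnn x (by simp [hx]))
    simp only [orMask, List.foldr_cons] at *
    rw [Nat.testBit_or, Nat.testBit_two_pow, ihl]
    have : (i.toNat = j) = ((j : Int) = i) := by
      apply propext
      constructor
      · rintro rfl; omega
      · rintro rfl; omega
    simp only [List.mem_cons, this]
    by_cases h1 : (j:Int) = i <;> by_cases h2 : (j:Int) ∈ l <;> simp [h1, h2]

lemma orMask_lt (l : List Int) (n : Nat) (hb : ∀ i ∈ l, 0 ≤ i ∧ i < (n : Int)) :
    orMask l < 2 ^ n := by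
  induction l with
  | nil => simp [orMask]
  | cons i l ih =>
    have h := hb i (by simp)
    have ihl := ih (fun x hx => hb x (by simp [hx]))
    simp only [orMask, List.foldr_cons] at *
    exact Nat.or_lt_two_pow (Nat.pow_lt_pow_right (by norm_num) (by omega)) ihl

lemma orMask_pos (l : List Int) (hnn : ∀ i ∈ l, 0 ≤ i) (hne : l ≠ []) : 0 < orMask l := by
  rcases List.exists_mem_of_ne_nil l hne with ⟨i, hi⟩
  by_contra h
  have h0 : orMask l = 0 := by omega
  have := testBit_orMask l hnn i.toNat
  rw [h0, Nat.zero_testBit] at this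
  have : ((i.toNat : Int) ∈ l) = False := by simpa using this.symm
  have hnn' := hnn i hi
  rw [show ((i.toNat : Int)) = i by omega] at this
  exact this ▸ hi

lemma mem_pvAcore_iff (M : Int) (hM : 0 < M) (l : List Int) :
    l ∈ pvAcore M ↔ l ≠ [] ∧ l.Sublist (PySem.List.pyRange 0 M 1) := by
  unfold pvAcore
  rw [List.mem_flatMap]
  constructor
  · rintro ⟨s, hs, hl⟩
    rw [PySem.List.mem_pyRange_neg_one] at hs
    rcases (mem_pyCombinations _ _ _).mp hl with ⟨hsub, hlen⟩
    refine ⟨?_, hsub⟩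
    intro he
    subst he
    simp at hlen
    omega
  · rintro ⟨hne, hsub⟩
    refine ⟨(l.length : Int), ?_, ?_⟩
    · rw [PySem.List.mem_pyRange_neg_one]
      have h1 : 0 < l.length := List.length_pos_of_ne_nil hne
      have h2 : l.length ≤ (PySem.List.pyRange 0 M 1).length := hsub.length_le
      rw [PySem.List.length_pyRange_one] at h2
      omega
    · rw [mem_pyCombinations]
      exact ⟨hsub, by simp⟩

lemma pred_eq_testBit (b i : Int) :
    ((b.toNat >>> i.toNat) &&& 1 == 1) = b.toNat.testBit i.toNat := by
  rw [Nat.testBit, Nat.and_comm]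
  rcases Nat.mod_two_eq_zero_or_one (b.toNat >>> i.toNat) with h | h <;>
    simp [h]

lemma exists_testBit_lt (x n : Nat) (h1 : 0 < x) (h2 : x < 2 ^ n) :
    ∃ j < n, x.testBit j = true := by
  by_contra h
  push Not at h
  have : x = 0 := by
    apply Nat.eq_of_testBit_eq
    intro i
    rw [Nat.zero_testBit]
    by_cases hi : i < n
    · simpa using h i hi
    · exact Nat.testBit_lt_two_pow (lt_of_lt_of_le h2 (Nat.pow_le_pow_right (by norm_num) (by omega)))
  omega

lemma mem_pvRaw_iff (M : Int) (hM : 0 < M) (l : List Int) :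
    l ∈ pvRaw M ↔ l ≠ [] ∧ l.Sublist (PySem.List.pyRange 0 M 1) := by
  have hmax : max M 0 = M := by omega
  unfold pvRaw
  rw [hmax, List.mem_map]
  constructor
  · rintro ⟨b, hb, rfl⟩
    rw [PySem.List.mem_pyRange_one] at hb
    obtain ⟨hb1, hb2⟩ := hb
    have hb' : 0 < b.toNat ∧ b.toNat < 2 ^ M.toNat := by omega
    refine ⟨?_, List.filter_sublist⟩
    rcases exists_testBit_lt b.toNat M.toNat hb'.1 hb'.2 with ⟨j, hj, hbit⟩
    have hjm : (j : Int) ∈ PySem.List.pyRange 0 M 1 := by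
      rw [PySem.List.mem_pyRange_one]; omega
    intro he
    have : (j : Int) ∈ (PySem.List.pyRange 0 M 1).filter
        (fun i => (b.toNat >>> i.toNat) &&& 1 == 1) := by
      rw [List.mem_filter]
      refine ⟨hjm, ?_⟩
      rw [pred_eq_testBit]
      simpa using hbit
    rw [he] at this
    simp at this
  · rintro ⟨hne, hsub⟩
    have hnn : ∀ i ∈ l, 0 ≤ i ∧ i < M := by
      intro i hi
      have := hsub.subset hi
      rw [PySem.List.mem_pyRange_one] at this
      omega
    refine ⟨(orMask l : Int), ?_, ?_⟩
    · rw [PySem.List.mem_pyRange_one]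
      have h1 := orMask_pos l (fun i hi => (hnn i hi).1) hne
      have h2 := orMask_lt l M.toNat (by intro i hi; have := hnn i hi; omega)
      constructor
      · omega
      · exact_mod_cast h2
    · rw [show (PySem.List.pyRange 0 M 1).filter
            (fun i => (((orMask l : Int)).toNat >>> i.toNat) &&& 1 == 1)
            = (PySem.List.pyRange 0 M 1).filter (fun i => l.contains i) from ?_]
      · exact filter_mem_of_sublist _ _ (PySem.List.nodup_pyRange_one 0 M) hsub
      · apply List.filter_congr
        intro i hi
        rw [PySem.List.mem_pyRange_one] at hi
        rw [pred_eq_testBit, show ((orMask l : Int)).toNat = orMask l by omega,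
          testBit_orMask l (fun x hx => (hnn x hx).1) i.toNat]
        rw [show ((i.toNat : Int)) = i by omega]
        simp

lemma nodup_pvRaw (M : Int) (hM : 0 < M) : (pvRaw M).Nodup := by
  have hmax : max M 0 = M := by omega
  unfold pvRaw
  rw [hmax]
  apply List.Nodup.map_on _ (PySem.List.nodup_pyRange_one 1 _)
  intro b hb b' hb' heq
  rw [PySem.List.mem_pyRange_one] at hb hb'
  obtain ⟨hbl, hbu⟩ := hb
  obtain ⟨hbl', hbu'⟩ := hb'
  have hbn : b.toNat < 2 ^ M.toNat := by omega
  have hbn' : b'.toNat < 2 ^ M.toNat := by omega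
  have : b.toNat = b'.toNat := by
    apply Nat.eq_of_testBit_eq
    intro j
    by_cases hj : j < M.toNat
    · have hjm : (j : Int) ∈ PySem.List.pyRange 0 M 1 := by
        rw [PySem.List.mem_pyRange_one]; omega
      have := congrArg (fun L => (j:Int) ∈ L) heq
      simp only [List.mem_filter, hjm, true_and, eq_iff_iff] at this
      rw [pred_eq_testBit, pred_eq_testBit] at this
      simp only [Int.toNat_natCast] at this
      rcases Bool.eq_false_or_eq_true (b.toNat.testBit j) with h | h <;>
        rcases Bool.eq_false_or_eq_true (b'.toNat.testBit j) with h' | h' <;>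
        simp [h, h'] at this ⊢
    · rw [Nat.testBit_lt_two_pow, Nat.testBit_lt_two_pow] <;>
        exact lt_of_lt_of_le (by assumption) (Nat.pow_le_pow_right (by norm_num) (by omega))
  omega

lemma pairwise_key_flatMap (M : Int) (sizes : List Int)
    (hd : sizes.Pairwise (fun a b => b < a)) (hmem : ∀ s ∈ sizes, 0 < s ∧ s ≤ M) :
    (sizes.flatMap (fun s => pyCombinations (PySem.List.pyRange 0 M 1) s.toNat)).Pairwise
      (fun a b => pvLt (pvKey M a) (pvKey M b)) := by
  induction sizes with
  | nil => simp
  | cons s rest ih =>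
    rw [List.pairwise_cons] at hd
    rw [List.flatMap_cons, List.pairwise_append]
    refine ⟨?_, ih hd.2 (fun x hx => hmem x (by simp [hx])), ?_⟩
    · apply (pairwise_pyCombinations _ (PySem.List.pairwise_lt_pyRange_one 0 M) s.toNat).imp_of_mem
      intro a b ha hb hab
      have hla := ((mem_pyCombinations _ _ _).mp ha).2
      have hlb := ((mem_pyCombinations _ _ _).mp hb).2
      unfold pvKey
      rw [hla, hlb]
      exact pvLt_cons hab
    · intro a ha b hb
      rcases List.mem_flatMap.mp hb with ⟨s', hs', hb'⟩
      have hs := hmem s (by simp)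
      have hs'' := hmem s' (by simp [hs'])
      have hlt := hd.1 s' hs'
      have hla := ((mem_pyCombinations _ _ _).mp ha).2
      have hlb := ((mem_pyCombinations _ _ _).mp hb').2
      unfold pvKey
      rw [hla, hlb]
      exact pvLt_rel _ _ (by omega)

lemma pairwise_key_pvAcore (M : Int) :
    (pvAcore M).Pairwise (fun a b => pvLt (pvKey M a) (pvKey M b)) := by
  apply pairwise_key_flatMap M
  · rw [PySem.List.pyRange_neg_one, List.pairwise_map]
    exact List.pairwise_lt_range.imp (by omega)
  · intro s hs
    rw [PySem.List.mem_pyRange_neg_one] at hs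
    omega

lemma nodup_pvAcore (M : Int) : (pvAcore M).Nodup := by
  apply (pairwise_key_pvAcore M).imp
  intro a b hab he
  subst he
  exact lt_irrefl _ hab

lemma sorted_raw_eq_pvAcore (M : Int) (hM : 0 < M) :
    @PySem.List.sorted (List Int) (List Int) List.instLinearOrder.toLT
      List.instLinearOrder.toDecidableLT (pvRaw M)
      (fun t => (max M 0 - (t.length : Int)) :: t) false = pvAcore M := by
  have hmax : max M 0 = M := by omega
  rw [hmax]
  apply PySem.List.sorted_eq_of_perm_of_pairwise_lt
  · rw [List.perm_ext_iff_of_nodup (nodup_pvAcore M) (nodup_pvRaw M hM)]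
    intro l
    rw [mem_pvAcore_iff M hM, mem_pvRaw_iff M hM]
  · exact pairwise_key_pvAcore M

lemma map_ofList_pvAcore (M : Int) (hM : 0 < M) :
    (pvAcore M).map PySem.Set.ofList = pvAcore M := by
  have : ∀ l ∈ pvAcore M, PySem.Set.ofList l = id l := by
    intro l hl
    rcases (mem_pvAcore_iff M hM l).mp hl with ⟨_, hsub⟩
    exact PySem.Set.ofList_eq_self_of_nodup l (hsub.nodup (PySem.List.nodup_pyRange_one 0 M))
  rw [List.map_congr_left this, List.map_id]

lemma enumerate_cons {α : Type} (t : α) (rest : List α) (s : Int) :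
    PySem.List.enumerate (t :: rest) s = (s, t) :: PySem.List.enumerate rest (s + 1) := by
  simp [PySem.List.enumerate]

-- inner loop of A's mask build: lookup after processing one subset
lemma getD_inner_fold (t : List Int) (k : Int) (v : Int) (m0 : Int) :
    ∀ d : PySem.Dict Int (PySem.Dict Int Int), t.Nodup →
    (t.foldl (fun d m => d.modify m PySem.Dict.empty (fun inner => inner.insert k v)) d).getD m0 PySem.Dict.empty
      = if m0 ∈ t then (d.getD m0 PySem.Dict.empty).insert k v else d.getD m0 PySem.Dict.empty := by
  induction t with
  | nil => intro d _; simp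
  | cons m t ih =>
    intro d hnd
    rw [List.nodup_cons] at hnd
    rw [List.foldl_cons, ih _ hnd.2]
    by_cases hm : m0 = m
    · subst hm
      rw [if_neg hnd.1, if_pos (by simp), PySem.Dict.getD_modify, if_pos rfl]
    · rw [PySem.Dict.getD_modify, if_neg hm]
      by_cases hm' : m0 ∈ t <;> simp [hm', hm, List.mem_cons]

lemma getD_mask_fold (M : Int) (m0 : Int) : ∀ (subs : List (List Int)) (s : Int)
    (d : PySem.Dict Int (PySem.Dict Int Int)), (∀ t ∈ subs, t.Nodup) →
    ((PySem.List.enumerate subs s).foldl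
        (fun d p => p.2.foldl (fun d m => d.modify m PySem.Dict.empty
          (fun inner => inner.insert p.1 (M - (p.2.length : Int)))) d) d).getD m0 PySem.Dict.empty
      = (PySem.List.enumerate subs s).foldl
          (fun inner p => if p.2.contains m0 then inner.insert p.1 (M - (p.2.length : Int)) else inner)
          (d.getD m0 PySem.Dict.empty) := by
  intro subs
  induction subs with
  | nil => intro s d _; simp [PySem.List.enumerate]
  | cons t rest ih =>
    intro s d hnd
    rw [enumerate_cons, List.foldl_cons, List.foldl_cons,
      ih (s+1) _ (fun x hx => hnd x (by simp [hx]))]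
    rw [getD_inner_fold t s (M - (t.length : Int)) m0 d (hnd t (by simp))]
    by_cases hm : m0 ∈ t
    · rw [if_pos hm, if_pos (by simpa [List.contains_iff_mem] using hm)]
    · rw [if_neg hm, if_neg (by simpa [List.contains_iff_mem] using hm)]

lemma items_if_insert_fold (m0 : Int) (g : List Int → Int) : ∀ (subs : List (List Int)) (s : Int)
    (inner : PySem.Dict Int Int), (∀ k ∈ inner.keys, k < s) →
    ((PySem.List.enumerate subs s).foldl
        (fun inner p => if p.2.contains m0 then inner.insert p.1 (g p.2) else inner) inner).items
      = inner.items ++ ((PySem.List.enumerate subs s).filter (fun p => p.2.contains m0)).map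
          (fun p => (p.1, g p.2)) := by
  intro subs
  induction subs with
  | nil => intro s inner _; simp [PySem.List.enumerate]
  | cons t rest ih =>
    intro s inner hk
    rw [enumerate_cons, List.foldl_cons, List.filter_cons]
    by_cases hc : t.contains m0
    · simp only [hc, if_pos]
      rw [ih (s+1) _ ?_]
      · rw [PySem.Dict.items_insert_of_not_contains _ _ ?_]
        · simp
        · by_contra hcon
          have := (PySem.Dict.contains_iff_mem_keys _ _).mp (by simpa using hcon)
          have := hk s this
          omega
      · intro k hkk
        rcases (PySem.Dict.mem_keys_insert _ _ _ _).mp hkk with rfl | h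
        · omega
        · have := hk k h; omega
    · rw [if_neg (by simpa [List.contains_iff_mem] using hc),
        if_neg (by simpa [List.contains_iff_mem] using hc)]
      rw [ih (s+1) _ (fun k hkk => by have := hk k hkk; omega)]

lemma set_update_of_subset (s : PySem.Set Int) (xs : List Int) (h : ∀ x ∈ xs, x ∈ s) :
    PySem.Set.update s xs = s := by
  rw [PySem.Set.update_eq_append_filter]
  have : (PySem.Set.ofList xs).filter (fun y => !s.contains y) = [] := by
    rw [List.filter_eq_nil_iff]
    intro a ha
    have := h a (by simpa using (PySem.Set.mem_ofList _ _).mp ha)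
    simp [this]
  rw [this, List.append_nil]

lemma keys_mask_fold (M : Int) : ∀ (subs : List (List Int)) (s : Int)
    (d : PySem.Dict Int (PySem.Dict Int Int)),
    (∀ t ∈ subs, ∀ m ∈ t, m ∈ d.keys) →
    ((PySem.List.enumerate subs s).foldl
        (fun d p => p.2.foldl (fun d m => d.modify m PySem.Dict.empty
          (fun inner => inner.insert p.1 (M - (p.2.length : Int)))) d) d).keys = d.keys := by
  intro subs
  induction subs with
  | nil => intro s d _; simp [PySem.List.enumerate]
  | cons t rest ih =>
    intro s d h
    rw [enumerate_cons, List.foldl_cons]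
    have hstep : (t.foldl (fun d m => d.modify m PySem.Dict.empty
        (fun inner => inner.insert s (M - (t.length : Int)))) d).keys = d.keys := by
      rw [PySem.Dict.keys_foldl_modify]
      exact set_update_of_subset _ _ (h t (by simp))
    rw [ih (s+1) _ (fun x hx m hm => by rw [hstep]; exact h x (by simp [hx]) m hm), hstep]

-- the assembled mask equality, for any subset list drawn from range(M)
lemma mask_eq (M : Int) (S : List (List Int))
    (hS : ∀ t ∈ S, t.Nodup ∧ ∀ m ∈ t, 0 ≤ m ∧ m < M) :
    (((PySem.List.enumerate S 0).foldl
        (fun d p => p.2.foldl (fun d m => d.modify m PySem.Dict.empty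
          (fun inner => inner.insert p.1 (M - (p.2.length : Int)))) d)
        ((PySem.List.pyRange 0 M 1).foldl (fun d m => d.insert m PySem.Dict.empty)
          PySem.Dict.empty)).items.map (fun q => (q.1, q.2.items)))
      = (PySem.List.pyRange 0 M 1).map
          (fun m => (m, ((PySem.List.enumerate S 0).filter (fun p => p.2.contains m)).map
            (fun p => (p.1, M - (p.2.length : Int))))) := by
  set R := PySem.List.pyRange 0 M 1 with hR
  set mask0 := R.foldl (fun d m => d.insert m PySem.Dict.empty)
      (PySem.Dict.empty : PySem.Dict Int (PySem.Dict Int Int)) with hm0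
  have hRnd : R.Nodup := PySem.List.nodup_pyRange_one 0 M
  have hitems0 : mask0.items = R.map (fun m => (m, (PySem.Dict.empty : PySem.Dict Int Int))) := by
    rw [hm0]
    rw [PySem.Dict.items_foldl_insert_fresh R (fun m => m)
      (fun _ => PySem.Dict.empty) PySem.Dict.empty (fun a _ => rfl) (by simpa using hRnd)]
    rfl
  have hkeys0 : mask0.keys = R := by
    rw [PySem.Dict.keys, hitems0, List.map_map]
    exact List.map_id _
  have hgetD0 : ∀ m ∈ R, mask0.getD m PySem.Dict.empty = PySem.Dict.empty := by
    intro m hm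
    exact PySem.Dict.getD_of_mem_items mask0
      (by rw [hitems0]; exact List.mem_map.mpr ⟨m, hm, rfl⟩) (by rw [hkeys0]; exact hRnd) _
  set fin := (PySem.List.enumerate S 0).foldl
      (fun d p => p.2.foldl (fun d m => d.modify m PySem.Dict.empty
        (fun inner => inner.insert p.1 (M - (p.2.length : Int)))) d) mask0 with hfin
  have hsub : ∀ t ∈ S, ∀ m ∈ t, m ∈ mask0.keys := by
    intro t ht m hm
    rw [hkeys0, hR, PySem.List.mem_pyRange_one]
    have := (hS t ht).2 m hm
    omega
  have hkeysfin : fin.keys = R := by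
    rw [hfin, keys_mask_fold M S 0 mask0 hsub, hkeys0]
  have hgetDfin : ∀ m ∈ R, (fin.getD m PySem.Dict.empty).items
      = ((PySem.List.enumerate S 0).filter (fun p => p.2.contains m)).map
          (fun p => (p.1, M - (p.2.length : Int))) := by
    intro m hm
    rw [hfin, getD_mask_fold M m S 0 mask0 (fun t ht => (hS t ht).1), hgetD0 m hm]
    rw [items_if_insert_fold m (fun t => M - (t.length : Int)) S 0 PySem.Dict.empty (by simp)]
    rw [show (PySem.Dict.empty : PySem.Dict Int Int).items = [] from rfl, List.nil_append]
  rw [PySem.Dict.items_eq_map_keys fin (by rw [hkeysfin]; exact hRnd) PySem.Dict.empty]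
  rw [hkeysfin, List.map_map]
  apply List.map_congr_left
  intro m hm
  simp [hgetDfin m hm]

-- A's subset list is pvAcore (for any M)
lemma subsA_eq (M : Int) :
    (PySem.List.pyRange M 0 (-1)).foldl
      (fun acc size =>
        (pyCombinations (PySem.List.pyRange 0 M 1) size.toNat).foldl
          (fun acc combo => acc ++ [PySem.Set.ofList combo]) acc) []
      = (pvAcore M).map PySem.Set.ofList := by
  simp only [PySem.List.foldl_append_singleton_eq_map]
  exact (PySem.List.foldl_append_eq_flatMap
      (fun size => (pyCombinations (PySem.List.pyRange 0 M 1) size.toNat).map PySem.Set.ofList)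
      (PySem.List.pyRange M 0 (-1)) []).trans
    (by rw [List.nil_append, pvAcore, List.map_flatMap])

lemma hS_pvAcore (M : Int) (hM : 0 < M) :
    ∀ t ∈ pvAcore M, t.Nodup ∧ ∀ m ∈ t, 0 ≤ m ∧ m < M := by
  intro t ht
  rcases (mem_pvAcore_iff M hM t).mp ht with ⟨_, hsub⟩
  refine ⟨hsub.nodup (PySem.List.nodup_pyRange_one 0 M), ?_⟩
  intro m hm
  have := hsub.subset hm
  rw [PySem.List.mem_pyRange_one] at this
  omega

-- ===== VERDICT (by name: the statement is the Claim_ definition above) =====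
theorem build_structure_tables_py_spec : Claim_equal_build_structure_tables_py := by
  intro M _
  unfold Spec_build_structure_tables_py build_structure_tables_py build_structure_tables_py_alt
  by_cases hM : 0 < M
  case neg =>
    have h1 : PySem.List.pyRange M 0 (-1) = [] := PySem.List.pyRange_neg_one_eq_nil (by omega)
    have h2 : PySem.List.pyRange 0 M 1 = [] := PySem.List.pyRange_one_eq_nil (by omega)
    have h3 : max M 0 = 0 := by omega
    have h4 : PySem.List.pyRange 1 (((2:Nat) ^ (0:Int).toNat : Nat) : Int) 1 = [] := by
      apply PySem.List.pyRange_one_eq_nil; norm_num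
    simp only [h1, h2, h3, h4, List.foldl_nil, List.map_nil]
    rfl
  case pos =>
    have hsubs : (PySem.List.pyRange M 0 (-1)).foldl
        (fun acc size =>
          (pyCombinations (PySem.List.pyRange 0 M 1) size.toNat).foldl
            (fun acc combo => acc ++ [PySem.Set.ofList combo]) acc) []
        = pvAcore M := by
      rw [subsA_eq, map_ofList_pvAcore M hM]
    have hraw : (PySem.List.pyRange 1 ((2 ^ (max M 0).toNat : Nat) : Int) 1).map
        (fun b => (PySem.List.pyRange 0 (max M 0) 1).filter
          (fun i => (b.toNat >>> i.toNat) &&& 1 == 1)) = pvRaw M := rfl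
    simp only [hsubs, hraw, sorted_raw_eq_pvAcore M hM, map_ofList_pvAcore M hM]
    rw [mask_eq M (pvAcore M) (hS_pvAcore M hM)]
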